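-- pv_equiv track=rewrite | github.com/KjellKod/snake | scripts/quest_runtime/pr_review_cycle.py | _write_scopes_overlap
-- ===== SOURCE A (Python) =====
-- def _path_is_prefix(prefix: str, candidate: str) -> bool:
--     return prefix == candidate or candidate.startswith(prefix + "/")
--
-- def _write_scopes_overlap(scope_a: list[str], scope_b: list[str]) -> bool:
--     if not scope_a or not scope_b:
--         return False
--     for path_a in scope_a:
--         for path_b in scope_b:
--             if _path_is_prefix(path_a, path_b) or _path_is_prefix(path_b, path_a):
--                 return True
--     return False
-- ===== SOURCE B (Python) =====
-- def _write_scopes_overlap(scope_a: list[str], scope_b: list[str]) -> bool: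
--     def ancestors(p):
--         # p itself plus every prefix of p that ends right before a '/'
--         anc = {p}
--         for i, ch in enumerate(p):
--             if ch == '/':
--                 anc.add(p[:i])
--         return anc
--     set_a = set(scope_a)
--     anc_a = set()
--     for p in scope_a:
--         anc_a.update(ancestors(p))
--     for q in scope_b:
--         if q in anc_a or any(x in set_a for x in ancestors(q)):
--             return True
--     return False
-- ===== Notes on version B (the rewrite author's own statement) =====
-- stated objective: alternative
-- what changed: Replaces the nested all-pairs startswith scan by hashing: build set(scope_a) and the set of all '/'-boundary ancestor prefixes of scope_a, then test each scope_b path and its ancestors by set membership; asymptotically O((|A|+|B|)*L) worst case, but A's early exit wins on inputs with an early match, so no speed is claimed.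
import Mathlib
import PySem

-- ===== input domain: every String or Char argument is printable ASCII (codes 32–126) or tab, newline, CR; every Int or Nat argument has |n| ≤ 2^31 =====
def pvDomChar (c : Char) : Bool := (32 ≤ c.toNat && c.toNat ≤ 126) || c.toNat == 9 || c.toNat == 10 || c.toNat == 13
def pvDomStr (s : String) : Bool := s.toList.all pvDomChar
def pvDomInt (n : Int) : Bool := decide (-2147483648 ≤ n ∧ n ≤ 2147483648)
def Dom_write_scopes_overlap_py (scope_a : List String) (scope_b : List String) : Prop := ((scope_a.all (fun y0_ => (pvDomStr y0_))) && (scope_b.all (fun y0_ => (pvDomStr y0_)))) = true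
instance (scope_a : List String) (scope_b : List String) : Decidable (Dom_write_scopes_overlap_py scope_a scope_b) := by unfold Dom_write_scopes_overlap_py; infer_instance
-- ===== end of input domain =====

-- B replaces A's all-pairs startswith scan by set membership over each path's '/'-boundary ancestor prefixes.
-- ===== PORT A =====
def path_is_prefix (pre cand : String) : Bool :=
  pre == cand || PySem.Chars.startswith cand.toList (pre.toList ++ ['/'])

def write_scopes_overlap_py (scope_a : List String) (scope_b : List String) : Bool :=
  if scope_a.isEmpty || scope_b.isEmpty then false
  else scope_a.any fun pa => scope_b.any fun pb =>
    path_is_prefix pa pb || path_is_prefix pb pa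

-- ===== PORT B =====
def ancestors (p : String) : PySem.Set String :=
  (PySem.List.enumerate p.toList 0).foldl
    (fun s ic => if ic.2 == '/' then PySem.Set.add s (String.ofList (PySem.Chars.slice p.toList none (some ic.1))) else s)
    (PySem.Set.ofList [p])

def write_scopes_overlap_py_alt (scope_a : List String) (scope_b : List String) : Bool :=
  let set_a : PySem.Set String := PySem.Set.ofList scope_a
  let anc_a : PySem.Set String := scope_a.foldl (fun s p => PySem.Set.update s (ancestors p)) PySem.Set.empty
  scope_b.any fun q =>
    PySem.Set.contains anc_a q || (ancestors q).any (fun x => PySem.Set.contains set_a x)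

-- ===== PRECONDITION & SPEC =====

def Spec_write_scopes_overlap_py (scope_a : List String) (scope_b : List String) (out : Bool) : Prop := out = write_scopes_overlap_py_alt scope_a scope_b
instance (scope_a : List String) (scope_b : List String) (out : Bool) : Decidable (Spec_write_scopes_overlap_py scope_a scope_b out) := by unfold Spec_write_scopes_overlap_py; infer_instance

-- ===== CLAIM (what is proved, stated in full; the proofs are below) =====
def Claim_equal_write_scopes_overlap_py : Prop := ∀ (scope_a : List String) (scope_b : List String), Dom_write_scopes_overlap_py scope_a scope_b → Spec_write_scopes_overlap_py scope_a scope_b (write_scopes_overlap_py scope_a scope_b)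

-- ===== LEMMAS AND PROOFS =====

theorem mem_foldl_if_add {α β : Type} [BEq α] [LawfulBEq α] (l : List β) (c : β → Bool)
    (f : β → α) (s : PySem.Set α) (x : α) :
    x ∈ l.foldl (fun s b => if c b then PySem.Set.add s (f b) else s) s ↔
      x ∈ s ∨ ∃ b ∈ l, c b ∧ x = f b := by
  induction l generalizing s with
  | nil => simp
  | cons h t ih =>
    simp only [List.foldl_cons, ih, List.mem_cons]
    by_cases hc : c h = true <;> simp [hc, PySem.Set.mem_add] <;> tauto

theorem mem_ancestors (x p : String) :
    x ∈ ancestors p ↔ x = p ∨ ∃ k, ∃ h : k < p.toList.length, p.toList[k] = '/' ∧ x.toList = p.toList.take k := by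
  unfold ancestors
  refine (mem_foldl_if_add (PySem.List.enumerate p.toList) (fun ic => ic.2 == '/')
      (fun ic => String.ofList (PySem.Chars.slice p.toList none (some ic.1)))
      (PySem.Set.ofList [p]) x).trans ?_
  simp only [PySem.Set.mem_ofList, List.mem_singleton, PySem.List.mem_enumerate_iff]
  constructor
  · rintro (h | ⟨b, ⟨k, hk, rfl⟩, hc, rfl⟩)
    · exact Or.inl h
    · refine Or.inr ⟨k, hk, by simpa using hc, ?_⟩
      simp [PySem.Chars.slice_eq_listSlice]
  · rintro (h | ⟨k, hk, hc, hx⟩)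
    · exact Or.inl h
    · refine Or.inr ⟨(0 + (k:Int), p.toList[k]), ⟨k, hk, rfl⟩, by simpa using hc, ?_⟩
      have h2 : PySem.Chars.slice p.toList none (some ((0:Int) + (k:Nat))) = p.toList.take k := by
        simp [PySem.Chars.slice_eq_listSlice]
      rw [h2, ← hx]
      exact String.ofList_toList.symm

theorem prefix_slash_iff (xs cs : List Char) :
    (xs ++ ['/']) <+: cs ↔ ∃ k, ∃ h : k < cs.length, cs[k] = '/' ∧ xs = cs.take k := by
  constructor
  · rintro ⟨t, ht⟩
    refine ⟨xs.length, by simp [← ht], ?_, ?_⟩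
    · simp [← ht]
    · simp [← ht]
  · rintro ⟨k, hk, hc, rfl⟩
    refine ⟨cs.drop (k+1), ?_⟩
    rw [List.append_assoc, List.singleton_append, ← hc, ← List.drop_eq_getElem_cons hk,
      List.take_append_drop]

theorem pref_iff (x p : String) :
    path_is_prefix x p = true ↔ x ∈ ancestors p := by
  unfold path_is_prefix
  rw [mem_ancestors]
  simp only [Bool.or_eq_true, beq_iff_eq, PySem.Chars.startswith_iff, prefix_slash_iff]

theorem mem_ancA (x : String) (l : List String) (s : PySem.Set String) :
    x ∈ l.foldl (fun s p => PySem.Set.update s (ancestors p)) s ↔ x ∈ s ∨ ∃ p ∈ l, x ∈ ancestors p := by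
  induction l generalizing s with
  | nil => simp
  | cons h t ih => simp [List.foldl, ih, PySem.Set.mem_update]; tauto

-- ===== VERDICT (by name: the statement is the Claim_ definition above) =====
theorem write_scopes_overlap_py_spec : Claim_equal_write_scopes_overlap_py := by
  intro a b _
  unfold Spec_write_scopes_overlap_py write_scopes_overlap_py write_scopes_overlap_py_alt
  rw [Bool.eq_iff_iff]
  by_cases ha : a = []
  · subst ha; simp
  by_cases hb : b = []
  · subst hb; simp
  rw [if_neg (by simp [ha, hb])]
  simp only [Bool.or_eq_true, List.any_eq_true, PySem.Set.contains_iff, mem_ancA,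
    PySem.Set.mem_ofList, PySem.Set.empty, List.not_mem_nil, false_or, pref_iff]
  constructor
  · rintro ⟨pa, hpa, pb, hpb, h | h⟩
    · exact ⟨pb, hpb, Or.inr ⟨pa, h, hpa⟩⟩
    · exact ⟨pb, hpb, Or.inl ⟨pa, hpa, h⟩⟩
  · rintro ⟨q, hq, ⟨p, hp, h⟩ | ⟨x, hx, hxa⟩⟩
    · exact ⟨p, hp, q, hq, Or.inr h⟩
    · exact ⟨x, hxa, q, hq, Or.inl hx⟩
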